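-- pv_equiv track=rewrite | github.com/DNYoussef/AIVillage | digital_twin/core/digital_twin.py | detect_learning_style
-- ===== SOURCE A (Python) =====
-- from typing import Any
--
-- def detect_learning_style(assessment: dict[str, Any]) -> str:
--     """Detect primary learning style from assessment."""
--     style_scores = {"visual": 0, "auditory": 0, "kinesthetic": 0, "reading": 0}
--
--     # Analyze response patterns
--     for response in assessment.get("responses", {}).values():
--         if "picture" in response.lower() or "see" in response.lower():
--             style_scores["visual"] += 1
--         if "hear" in response.lower() or "listen" in response.lower():
--             style_scores["auditory"] += 1
--         if "hands" in response.lower() or "touch" in response.lower():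
--             style_scores["kinesthetic"] += 1
--         if "read" in response.lower() or "write" in response.lower():
--             style_scores["reading"] += 1
--
--     # Return dominant style or balanced
--     max_score = max(style_scores.values())
--     if max_score == 0:
--         return "balanced"
--
--     return max(style_scores, key=style_scores.get)
-- ===== SOURCE B (Python) =====
-- def detect_learning_style(assessment: dict) -> str:
--     """Detect primary learning style from assessment."""
--     table = [
--         ("visual", ("picture", "see")),
--         ("auditory", ("hear", "listen")),
--         ("kinesthetic", ("hands", "touch")),
--         ("reading", ("read", "write")),
--     ]
--     responses = [r.lower() for r in assessment.get("responses", {}).values()]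
--     best_style, best_score = "balanced", 0
--     for style, keywords in table:
--         score = sum(1 for r in responses if any(k in r for k in keywords))
--         if score > best_score:
--             best_style, best_score = style, score
--     return best_style
-- ===== Notes on version B (the rewrite author's own statement) =====
-- stated objective: simpler
-- what changed: Replaces the four inline if-branches and the scores dict + max(..., key=...) with a keyword table iterated style-by-style (each style's score counted over pre-lowered responses) and an explicit running first-argmax that yields 'balanced' when no score beats 0.
import Mathlib
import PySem

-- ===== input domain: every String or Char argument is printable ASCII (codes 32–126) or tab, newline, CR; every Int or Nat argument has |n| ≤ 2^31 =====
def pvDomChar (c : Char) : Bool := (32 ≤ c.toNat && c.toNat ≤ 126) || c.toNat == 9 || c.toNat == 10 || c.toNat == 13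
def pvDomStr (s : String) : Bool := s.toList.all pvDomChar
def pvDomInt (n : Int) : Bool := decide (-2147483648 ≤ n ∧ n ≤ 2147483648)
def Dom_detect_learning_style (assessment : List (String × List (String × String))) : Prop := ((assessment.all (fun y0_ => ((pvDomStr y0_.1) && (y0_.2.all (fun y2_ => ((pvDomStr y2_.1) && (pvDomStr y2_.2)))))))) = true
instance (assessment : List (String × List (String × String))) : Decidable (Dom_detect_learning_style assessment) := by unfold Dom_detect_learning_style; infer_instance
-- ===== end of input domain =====

-- B replaces A's four inline if-branches and scores-dict + max(..., key=...) with a keyword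
-- table and an explicit running first-argmax over per-style counts (objective: simpler).

-- ===== PORT A =====
-- loop body of A's 'for response in ...' as a named helper (same four ifs, same order)
def pvStepA (sc : PySem.Dict String Int) (response : String) : PySem.Dict String Int :=
  let sc := if PySem.Str.isIn "picture" (PySem.Str.lower response)
               || PySem.Str.isIn "see" (PySem.Str.lower response)
            then sc.modify "visual" 0 (· + 1) else sc
  let sc := if PySem.Str.isIn "hear" (PySem.Str.lower response)
               || PySem.Str.isIn "listen" (PySem.Str.lower response)
            then sc.modify "auditory" 0 (· + 1) else sc
  let sc := if PySem.Str.isIn "hands" (PySem.Str.lower response)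
               || PySem.Str.isIn "touch" (PySem.Str.lower response)
            then sc.modify "kinesthetic" 0 (· + 1) else sc
  if PySem.Str.isIn "read" (PySem.Str.lower response)
     || PySem.Str.isIn "write" (PySem.Str.lower response)
  then sc.modify "reading" 0 (· + 1) else sc

def detect_learning_style (assessment : List (String × List (String × String))) : String :=
  let scores : PySem.Dict String Int :=
    PySem.Dict.ofList [("visual", 0), ("auditory", 0), ("kinesthetic", 0), ("reading", 0)]
  let responses :=
    (PySem.Dict.ofList ((PySem.Dict.ofList assessment).getD "responses" [])).values
  let scores := responses.foldl pvStepA scores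
  let maxScore := (PySem.List.max? scores.values (fun x => x)).getD 0
  if maxScore = 0 then "balanced"
  else (PySem.List.max? scores.keys (fun k => scores.getD k 0)).getD "balanced"

-- ===== PORT B =====
def detect_learning_style_alt (assessment : List (String × List (String × String))) : String :=
  let table : List (String × List String) :=
    [("visual", ["picture", "see"]), ("auditory", ["hear", "listen"]),
     ("kinesthetic", ["hands", "touch"]), ("reading", ["read", "write"])]
  let responses :=
    ((PySem.Dict.ofList ((PySem.Dict.ofList assessment).getD "responses" [])).values).map
      (fun r => PySem.Str.lower r)
  (table.foldl (fun best entry =>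
      let score : Int :=
        ((responses.filter (fun r => entry.2.any (fun kw => PySem.Str.isIn kw r))).length : Int)
      if best.2 < score then (entry.1, score) else best)
    ("balanced", 0)).1

-- ===== PRECONDITION & SPEC =====
def Spec_detect_learning_style (assessment : List (String × List (String × String))) (out : String) : Prop := out = detect_learning_style_alt assessment
instance (assessment : List (String × List (String × String))) (out : String) : Decidable (Spec_detect_learning_style assessment out) := by unfold Spec_detect_learning_style; infer_instance

-- ===== CLAIM (what is proved, stated in full; the proofs are below) =====
def Claim_equal_detect_learning_style : Prop := ∀ (assessment : List (String × List (String × String))), Dom_detect_learning_style assessment → Spec_detect_learning_style assessment (detect_learning_style assessment)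

-- ===== LEMMAS AND PROOFS =====

-- the four per-response tests, phrased as A phrases them
def pvPV (s : String) : Bool := PySem.Str.isIn "picture" (PySem.Str.lower s) || PySem.Str.isIn "see" (PySem.Str.lower s)
def pvPA (s : String) : Bool := PySem.Str.isIn "hear" (PySem.Str.lower s) || PySem.Str.isIn "listen" (PySem.Str.lower s)
def pvPK (s : String) : Bool := PySem.Str.isIn "hands" (PySem.Str.lower s) || PySem.Str.isIn "touch" (PySem.Str.lower s)
def pvPR (s : String) : Bool := PySem.Str.isIn "read" (PySem.Str.lower s) || PySem.Str.isIn "write" (PySem.Str.lower s)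

def pvMk4 (v a k r : Int) : PySem.Dict String Int :=
  PySem.Dict.mk [("visual", v), ("auditory", a), ("kinesthetic", k), ("reading", r)]

lemma pvGetD_v (v a k r : Int) : (pvMk4 v a k r).getD "visual" 0 = v := rfl
lemma pvGetD_a (v a k r : Int) : (pvMk4 v a k r).getD "auditory" 0 = a := rfl
lemma pvGetD_k (v a k r : Int) : (pvMk4 v a k r).getD "kinesthetic" 0 = k := rfl
lemma pvGetD_r (v a k r : Int) : (pvMk4 v a k r).getD "reading" 0 = r := rfl

lemma pvStepA_mk4 (v a k r : Int) (s : String) :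
    pvStepA (pvMk4 v a k r) s =
      pvMk4 (if pvPV s then v + 1 else v) (if pvPA s then a + 1 else a)
            (if pvPK s then k + 1 else k) (if pvPR s then r + 1 else r) := by
  unfold pvStepA pvPV pvPA pvPK pvPR
  split_ifs <;> rfl

lemma pvLoopA (rs : List String) (v a k r : Int) :
    rs.foldl pvStepA (pvMk4 v a k r) =
      pvMk4 (v + rs.countP pvPV) (a + rs.countP pvPA) (k + rs.countP pvPK) (r + rs.countP pvPR) := by
  induction rs generalizing v a k r with
  | nil => simp
  | cons h t ih =>
    rw [List.foldl_cons, pvStepA_mk4, ih]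
    simp only [List.countP_cons, pvMk4, PySem.Dict.mk.injEq, List.cons.injEq, Prod.mk.injEq,
      true_and, and_true]
    split_ifs <;> push_cast <;> omega

-- B's per-style count over pre-lowered responses equals A's per-response test count
lemma pvCnt (kw1 kw2 : String) (p : String → Bool)
    (hp : ∀ s, p s = (PySem.Str.isIn kw1 (PySem.Str.lower s) || PySem.Str.isIn kw2 (PySem.Str.lower s)))
    (rs : List String) :
    ((rs.map (fun r => PySem.Str.lower r)).filter
        (fun r => ([kw1, kw2] : List String).any (fun kw => PySem.Str.isIn kw r))).length
      = rs.countP p := by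
  induction rs with
  | nil => rfl
  | cons h t ih => simp [List.filter_cons, List.countP_cons, hp, ih]; split_ifs <;> simp_all

set_option maxHeartbeats 1000000 in
lemma pvFinal (v a k r : Int) (hv : 0 ≤ v) (ha : 0 ≤ a) (hk : 0 ≤ k) (hr : 0 ≤ r) :
    (if (PySem.List.max? (pvMk4 v a k r).values (fun x => x)).getD 0 = 0 then "balanced"
     else (PySem.List.max? (pvMk4 v a k r).keys (fun s => (pvMk4 v a k r).getD s 0)).getD "balanced")
    =
    ((([("visual", v), ("auditory", a), ("kinesthetic", k),
        ("reading", r)] : List (String × Int)).foldl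
        (fun best entry => if best.2 < entry.2 then (entry.1, entry.2) else best)
        ("balanced", 0)).1) := by
  show (if (PySem.List.max? [v, a, k, r] (fun x => x)).getD 0 = 0 then "balanced"
     else (PySem.List.max? ["visual", "auditory", "kinesthetic", "reading"]
        (fun s => (pvMk4 v a k r).getD s 0)).getD "balanced") = _
  by_cases c1 : v < a
  · by_cases c2 : a < k
    · by_cases c3 : k < r
      · simp only [List.foldl_cons, List.foldl_nil, PySem.List.max?, pvGetD_v, pvGetD_a,
          pvGetD_k, pvGetD_r, c1, c2, c3, if_pos, ite_true, ite_false]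
        split_ifs at * <;> simp_all [pvGetD_v, pvGetD_a, pvGetD_k, pvGetD_r] <;>
          first | omega | (split_ifs at * <;> simp_all <;> omega)
      · simp only [List.foldl_cons, List.foldl_nil, PySem.List.max?, pvGetD_v, pvGetD_a,
          pvGetD_k, pvGetD_r, c1, c2, c3, if_pos, ite_true, ite_false]
        split_ifs at * <;> simp_all [pvGetD_v, pvGetD_a, pvGetD_k, pvGetD_r] <;>
          first | omega | (split_ifs at * <;> simp_all <;> omega)
    · by_cases c3 : a < r
      · simp only [List.foldl_cons, List.foldl_nil, PySem.List.max?, pvGetD_v, pvGetD_a,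
          pvGetD_k, pvGetD_r, c1, c2, c3, if_pos, ite_true, ite_false]
        split_ifs at * <;> simp_all [pvGetD_v, pvGetD_a, pvGetD_k, pvGetD_r] <;>
          first | omega | (split_ifs at * <;> simp_all <;> omega)
      · simp only [List.foldl_cons, List.foldl_nil, PySem.List.max?, pvGetD_v, pvGetD_a,
          pvGetD_k, pvGetD_r, c1, c2, c3, if_pos, ite_true, ite_false]
        split_ifs at * <;> simp_all [pvGetD_v, pvGetD_a, pvGetD_k, pvGetD_r] <;>
          first | omega | (split_ifs at * <;> simp_all <;> omega)
  · by_cases c2 : v < k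
    · by_cases c3 : k < r
      · simp only [List.foldl_cons, List.foldl_nil, PySem.List.max?, pvGetD_v, pvGetD_a,
          pvGetD_k, pvGetD_r, c1, c2, c3, if_pos, ite_true, ite_false]
        split_ifs at * <;> simp_all [pvGetD_v, pvGetD_a, pvGetD_k, pvGetD_r] <;>
          first | omega | (split_ifs at * <;> simp_all <;> omega)
      · simp only [List.foldl_cons, List.foldl_nil, PySem.List.max?, pvGetD_v, pvGetD_a,
          pvGetD_k, pvGetD_r, c1, c2, c3, if_pos, ite_true, ite_false]
        split_ifs at * <;> simp_all [pvGetD_v, pvGetD_a, pvGetD_k, pvGetD_r] <;>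
          first | omega | (split_ifs at * <;> simp_all <;> omega)
    · by_cases c3 : v < r
      · simp only [List.foldl_cons, List.foldl_nil, PySem.List.max?, pvGetD_v, pvGetD_a,
          pvGetD_k, pvGetD_r, c1, c2, c3, if_pos, ite_true, ite_false]
        split_ifs at * <;> simp_all [pvGetD_v, pvGetD_a, pvGetD_k, pvGetD_r] <;>
          first | omega | (split_ifs at * <;> simp_all <;> omega)
      · simp only [List.foldl_cons, List.foldl_nil, PySem.List.max?, pvGetD_v, pvGetD_a,
          pvGetD_k, pvGetD_r, c1, c2, c3, if_pos, ite_true, ite_false]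
        split_ifs at * <;> simp_all [pvGetD_v, pvGetD_a, pvGetD_k, pvGetD_r] <;>
          first | omega | (split_ifs at * <;> simp_all <;> omega)

-- ===== VERDICT (by name: the statement is the Claim_ definition above) =====
theorem detect_learning_style_spec : Claim_equal_detect_learning_style := by
  intro assessment _
  unfold Spec_detect_learning_style detect_learning_style detect_learning_style_alt
  dsimp only
  rw [show PySem.Dict.ofList [("visual", (0 : Int)), ("auditory", 0), ("kinesthetic", 0), ("reading", 0)]
        = pvMk4 0 0 0 0 from rfl]
  set rs := (PySem.Dict.ofList ((PySem.Dict.ofList assessment).getD "responses" [])).values with hrs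
  rw [pvLoopA]
  simp only [zero_add, List.foldl_cons, List.foldl_nil]
  rw [pvCnt "picture" "see" pvPV (fun s => rfl) rs,
      pvCnt "hear" "listen" pvPA (fun s => rfl) rs,
      pvCnt "hands" "touch" pvPK (fun s => rfl) rs,
      pvCnt "read" "write" pvPR (fun s => rfl) rs]
  have := pvFinal (rs.countP pvPV) (rs.countP pvPA) (rs.countP pvPK) (rs.countP pvPR)
    (Int.natCast_nonneg _) (Int.natCast_nonneg _) (Int.natCast_nonneg _) (Int.natCast_nonneg _)
  rw [this]
  simp only [List.foldl_cons, List.foldl_nil]
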